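-- pv_equiv track=rewrite | github.com/fernando-mota-1/interview-prep | arrays/array_pairs.py | solve
-- ===== SOURCE A (Python) =====
-- def solve(arr):
--     # Write your code here
--     sz = len(arr)
--     mx = arr[0]
--     counter = 0
--     for i in range(sz-1):
--         mx = arr[i]
--         if arr[i] == 1:
--             counter += sz-1 - i
--             continue
--         for j in range(i+1, sz):
--             if arr[j] > mx:
--                 mx = arr[j]
--             if arr[i]*arr[j] <= mx:
--                 counter += 1
--     return counter
-- ===== SOURCE B (Python) =====
-- def solve(arr):
--     # Divide and conquer on index ranges: pairs entirely in each half recursively,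
--     # plus crossing pairs counted with left/right running maxima.
--     def count(lo, hi):
--         if hi - lo < 2:
--             return 0
--         mid = (lo + hi) // 2
--         c = count(lo, mid) + count(mid, hi)
--         lmax = arr[mid - 1]
--         for i in range(mid - 1, lo - 1, -1):
--             lmax = max(lmax, arr[i])
--             m = lmax
--             for j in range(mid, hi):
--                 m = max(m, arr[j])
--                 if arr[i] * arr[j] <= m:
--                     c += 1
--         return c
--     return count(0, len(arr))
-- ===== Notes on version B (the rewrite author's own statement) =====
-- stated objective: alternative
-- what changed: Replaced the index-ordered double loop with its arr[i]==1 shortcut by a midpoint divide-and-conquer: each half is counted recursively and crossing pairs are counted with a backward left running maximum and a forward right running maximum.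
import Mathlib
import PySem

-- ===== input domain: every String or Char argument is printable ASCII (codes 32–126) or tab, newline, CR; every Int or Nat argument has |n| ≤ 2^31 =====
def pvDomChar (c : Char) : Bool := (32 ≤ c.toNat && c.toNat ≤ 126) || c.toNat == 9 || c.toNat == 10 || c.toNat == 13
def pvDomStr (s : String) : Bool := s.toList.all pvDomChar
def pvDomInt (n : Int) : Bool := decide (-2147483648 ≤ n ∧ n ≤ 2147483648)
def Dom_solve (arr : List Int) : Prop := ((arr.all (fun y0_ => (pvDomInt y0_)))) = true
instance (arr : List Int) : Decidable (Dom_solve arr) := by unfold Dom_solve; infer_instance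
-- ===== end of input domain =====

-- B replaces A's index-ordered double loop (with its arr[i]==1 shortcut) by a midpoint
-- divide-and-conquer: halves recursively, crossing pairs via left/right running maxima.

-- ===== PORT A =====
-- Python's initial 'mx = arr[0]' raises IndexError on [] (excluded by Pre_solve) and is
-- otherwise overwritten ('mx = arr[i]') before any use, so it is not carried here.
def solve (arr : List Int) : Int :=
  let sz := arr.length
  (List.range' 0 (sz - 1)).foldl (fun counter i =>
    if arr.getD i 0 = 1 then counter + ((sz : Int) - 1 - (i : Int))
    else
      ((List.range' (i + 1) (sz - (i + 1))).foldl (fun (st : Int × Int) j =>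
          let mx := if arr.getD j 0 > st.1 then arr.getD j 0 else st.1
          (mx, if arr.getD i 0 * arr.getD j 0 ≤ mx then st.2 + 1 else st.2))
        (arr.getD i 0, counter)).2) 0

-- ===== PORT B =====
-- Python's 'count(lo, hi)' recursion; 'fuel' is only a structural totality guard
-- (any fuel ≥ hi - lo reproduces the recursion exactly).
def bCountAux (fuel : Nat) (arr : List Int) (lo hi : Nat) : Int :=
  match fuel with
  | 0 => 0
  | fuel + 1 =>
    if hi - lo < 2 then 0
    else
      let mid := (lo + hi) / 2
      let c := bCountAux fuel arr lo mid + bCountAux fuel arr mid hi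
      -- 'for i in range(mid-1, lo-1, -1)' = the indices lo..mid-1 in descending order
      (((List.range' lo (mid - lo)).reverse).foldl (fun (st : Int × Int) i =>
          let lmax := max st.1 (arr.getD i 0)
          ((lmax, ((List.range' mid (hi - mid)).foldl (fun (p : Int × Int) j =>
              let m := max p.1 (arr.getD j 0)
              (m, if arr.getD i 0 * arr.getD j 0 ≤ m then p.2 + 1 else p.2))
            (lmax, st.2)).2) : Int × Int))
        (arr.getD (mid - 1) 0, c)).2

def solve_alt (arr : List Int) : Int := bCountAux arr.length arr 0 arr.length

-- ===== PRECONDITION & SPEC =====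
-- Pre_solve excludes exactly the empty list, on which Python's A raises IndexError at 'arr[0]'.
def Pre_solve (arr : List Int) : Prop := arr ≠ []
instance (arr : List Int) : Decidable (Pre_solve arr) := by unfold Pre_solve; infer_instance
def pvWitness_solve : List Int := [2, 1, 3]

def Spec_solve (arr : List Int) (out : Int) : Prop := out = solve_alt arr
instance (arr : List Int) (out : Int) : Decidable (Spec_solve arr out) := by unfold Spec_solve; infer_instance

-- ===== CLAIM (what is proved, stated in full; the proofs are below) =====
def Claim_equal_solve : Prop := ∀ (arr : List Int), Dom_solve arr → Pre_solve arr → Spec_solve arr (solve arr)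

-- ===== LEMMAS AND PROOFS =====

-- max of arr[i..j], computed the way Python's running maximum produces it
def segMax (arr : List Int) (i j : Nat) : Int :=
  (List.range' (i + 1) (j - i)).foldl (fun m k => max m (arr.getD k 0)) (arr.getD i 0)

def pairOk (arr : List Int) (i j : Nat) : Bool :=
  decide (arr.getD i 0 * arr.getD j 0 ≤ segMax arr i j)

-- number of j in [a,b) paired admissibly with i
def cntI (arr : List Int) (i a b : Nat) : Int :=
  ((List.range' a (b - a)).countP (pairOk arr i) : Nat)

-- number of admissible pairs i < j inside [lo,hi)
def cnt (arr : List Int) (lo hi : Nat) : Int :=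
  ((List.range' lo (hi - lo)).map (fun i => cntI arr i (i + 1) hi)).sum

theorem segMax_self (arr : List Int) (i : Nat) : segMax arr i i = arr.getD i 0 := by
  simp [segMax]

theorem segMax_succ (arr : List Int) {i j : Nat} (h : i ≤ j) :
    segMax arr i (j + 1) = max (segMax arr i j) (arr.getD (j + 1) 0) := by
  unfold segMax
  rw [show j + 1 - i = (j - i) + 1 by omega, List.range'_1_concat,
      show i + 1 + (j - i) = j + 1 by omega, List.foldl_append]
  simp

theorem foldl_max_init (g : Nat → Int) (l : List Nat) : ∀ (a b : Int),
    l.foldl (fun m k => max m (g k)) (max a b) = max a (l.foldl (fun m k => max m (g k)) b) := by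
  induction l with
  | nil => intro a b; rfl
  | cons x t ih => intro a b; simp only [List.foldl_cons]; rw [max_assoc]; exact ih a (max b (g x))

theorem segMax_cons (arr : List Int) {i j : Nat} (h : i < j) :
    segMax arr i j = max (arr.getD i 0) (segMax arr (i + 1) j) := by
  unfold segMax
  rw [show j - i = (j - (i + 1)) + 1 by omega, List.range'_succ, List.foldl_cons]
  exact foldl_max_init (fun k => arr.getD k 0) _ (arr.getD i 0) (arr.getD (i + 1) 0)

theorem le_segMax (arr : List Int) {i j : Nat} (h : i ≤ j) : arr.getD j 0 ≤ segMax arr i j := by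
  obtain ⟨d, rfl⟩ := Nat.exists_eq_add_of_le h
  cases d with
  | zero => simp [segMax_self]
  | succ k =>
    rw [show i + (k + 1) = (i + k) + 1 from rfl, segMax_succ arr (by omega)]
    exact le_max_right _ _

theorem cntI_empty (arr : List Int) (i a : Nat) : cntI arr i a a = 0 := by
  simp [cntI]

theorem cntI_cons (arr : List Int) (i s len : Nat) :
    cntI arr i s (s + (len + 1)) = (if pairOk arr i s then 1 else 0) + cntI arr i (s + 1) (s + 1 + len) := by
  unfold cntI
  rw [show s + (len + 1) - s = len + 1 by omega, List.range'_succ, List.countP_cons,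
      show s + 1 + len - (s + 1) = len by omega]
  by_cases h : pairOk arr i s
  · simp [h]; omega
  · simp [h]

-- the inner j-loop: starting from the running maximum of arr[i..s-1], folding over
-- j = s .. s+len-1 yields the running maximum of arr[i..s-1+len] and counts the pairs
theorem innerFold (arr : List Int) (i : Nat) (len : Nat) :
    ∀ (s : Nat) (c : Int), i + 1 ≤ s →
    (List.range' s len).foldl (fun (p : Int × Int) j =>
        let m := max p.1 (arr.getD j 0)
        (m, if arr.getD i 0 * arr.getD j 0 ≤ m then p.2 + 1 else p.2))
      (segMax arr i (s - 1), c)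
    = (segMax arr i (s - 1 + len), c + cntI arr i s (s + len)) := by
  induction len with
  | zero => intro s c h; simp [cntI_empty]
  | succ k ih =>
    intro s c h
    rw [List.range'_succ, List.foldl_cons]
    have hm : max (segMax arr i (s - 1)) (arr.getD s 0) = segMax arr i s := by
      have := (segMax_succ arr (i := i) (j := s - 1) (by omega)).symm
      rwa [show s - 1 + 1 = s by omega] at this
    simp only [hm]
    have h2 := ih (s + 1) (if arr.getD i 0 * arr.getD s 0 ≤ segMax arr i s then c + 1 else c) (by omega)
    rw [Nat.add_sub_cancel] at h2
    rw [h2, show s - 1 + (k + 1) = s + k by omega, cntI_cons arr i s k]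
    refine Prod.ext rfl ?_
    simp only [pairOk, decide_eq_true_eq]
    split_ifs <;> ring

-- A's inner step function is the max-form step function
theorem astep_eq (arr : List Int) (i : Nat) :
    (fun (st : Int × Int) j =>
       let mx := if arr.getD j 0 > st.1 then arr.getD j 0 else st.1
       (mx, if arr.getD i 0 * arr.getD j 0 ≤ mx then st.2 + 1 else st.2))
    = (fun (p : Int × Int) j =>
       let m := max p.1 (arr.getD j 0)
       (m, if arr.getD i 0 * arr.getD j 0 ≤ m then p.2 + 1 else p.2)) := by
  funext p j
  have hx : (if arr.getD j 0 > p.1 then arr.getD j 0 else p.1) = max p.1 (arr.getD j 0) := by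
    by_cases hle : arr.getD j 0 ≤ p.1
    · rw [if_neg (by omega), max_eq_left hle]
    · rw [if_pos (by omega), max_eq_right (by omega)]
  simp only [hx]

theorem cntI_of_one (arr : List Int) {i n : Nat} (h1 : arr.getD i 0 = 1) (h : i + 1 ≤ n) :
    cntI arr i (i + 1) n = (n : Int) - 1 - (i : Int) := by
  unfold cntI
  rw [List.countP_eq_length.mpr]
  · rw [List.length_range']; omega
  · intro j hj
    have hji : i + 1 ≤ j := (List.mem_range'_1.mp hj).1
    simp only [pairOk, decide_eq_true_eq]
    rw [h1, one_mul]
    exact le_segMax arr (by omega)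

theorem outerA (arr : List Int) (len : Nat) :
    ∀ (s : Nat) (c : Int), s + len ≤ arr.length →
    (List.range' s len).foldl (fun counter i =>
        if arr.getD i 0 = 1 then counter + ((arr.length : Int) - 1 - (i : Int))
        else
          ((List.range' (i + 1) (arr.length - (i + 1))).foldl (fun (st : Int × Int) j =>
              let mx := if arr.getD j 0 > st.1 then arr.getD j 0 else st.1
              (mx, if arr.getD i 0 * arr.getD j 0 ≤ mx then st.2 + 1 else st.2))
            (arr.getD i 0, counter)).2) c
    = c + ((List.range' s len).map (fun i => cntI arr i (i + 1) arr.length)).sum := by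
  induction len with
  | zero => intro s c _; simp
  | succ k ih =>
    intro s c h
    rw [List.range'_succ, List.foldl_cons, List.map_cons, List.sum_cons]
    by_cases h1 : arr.getD s 0 = 1
    · rw [if_pos h1, ih (s + 1) _ (by omega), cntI_of_one arr h1 (by omega)]
      ring
    · rw [if_neg h1, astep_eq arr s]
      have hinner := innerFold arr s (arr.length - (s + 1)) (s + 1) c (by omega)
      rw [Nat.add_sub_cancel, segMax_self,
          show s + 1 + (arr.length - (s + 1)) = arr.length by omega] at hinner
      rw [hinner, ih (s + 1) _ (by omega)]
      ring

theorem solve_eq_cnt (arr : List Int) : solve arr = cnt arr 0 arr.length := by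
  unfold solve cnt
  rw [outerA arr (arr.length - 1) 0 0 (by omega), zero_add]
  cases hn : arr.length with
  | zero => simp
  | succ m =>
    rw [show m + 1 - 1 = m by omega, show m + 1 - 0 = m + 1 by omega,
        List.range'_1_concat, List.map_append, List.sum_append]
    simp [cntI]

theorem cnt_small (arr : List Int) {lo hi : Nat} (h : hi - lo < 2) : cnt arr lo hi = 0 := by
  unfold cnt
  rcases (show hi - lo = 0 ∨ hi - lo = 1 by omega) with h0 | h0 <;> rw [h0]
  · simp
  · rw [List.range'_one]
    simp [cntI, show hi - (lo + 1) = 0 by omega]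

theorem range'_split (lo mid hi : Nat) (h1 : lo ≤ mid) (h2 : mid ≤ hi) :
    List.range' lo (hi - lo) = List.range' lo (mid - lo) ++ List.range' mid (hi - mid) := by
  have h := @List.range'_append_1 lo (mid - lo) (hi - mid)
  rw [show lo + (mid - lo) = mid by omega, show mid - lo + (hi - mid) = hi - lo by omega] at h
  exact h.symm

theorem cntI_split (arr : List Int) (i : Nat) {a m b : Nat} (h1 : a ≤ m) (h2 : m ≤ b) :
    cntI arr i a b = cntI arr i a m + cntI arr i m b := by
  unfold cntI
  rw [range'_split a m b h1 h2, List.countP_append]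
  push_cast; ring

theorem cnt_split (arr : List Int) {lo mid hi : Nat} (h1 : lo ≤ mid) (h2 : mid ≤ hi) :
    cnt arr lo hi = cnt arr lo mid + cnt arr mid hi
      + ((List.range' lo (mid - lo)).map (fun i => cntI arr i mid hi)).sum := by
  unfold cnt
  rw [range'_split lo mid hi h1 h2, List.map_append, List.sum_append]
  have hmap : (List.range' lo (mid - lo)).map (fun i => cntI arr i (i + 1) hi)
      = (List.range' lo (mid - lo)).map (fun i => cntI arr i (i + 1) mid + cntI arr i mid hi) := by
    apply List.map_congr_left
    intro i hi'
    have hm := List.mem_range'_1.mp hi'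
    exact cntI_split arr i (by omega) h2
  rw [hmap, List.sum_map_add]
  ring

-- the backward i-loop of B's crossing count
theorem crossFold (arr : List Int) (mid hi : Nat) (hmh : mid ≤ hi) (len : Nat) :
    ∀ (lo : Nat) (lmax c : Int), lo + len + 1 ≤ mid →
    max lmax (arr.getD (lo + len) 0) = segMax arr (lo + len) (mid - 1) →
    ((List.range' lo (len + 1)).reverse).foldl (fun (st : Int × Int) i =>
        let lmax := max st.1 (arr.getD i 0)
        ((lmax, ((List.range' mid (hi - mid)).foldl (fun (p : Int × Int) j =>
            let m := max p.1 (arr.getD j 0)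
            (m, if arr.getD i 0 * arr.getD j 0 ≤ m then p.2 + 1 else p.2))
          (lmax, st.2)).2) : Int × Int))
      (lmax, c)
    = (segMax arr lo (mid - 1),
       c + ((List.range' lo (len + 1)).map (fun i => cntI arr i mid hi)).sum) := by
  induction len with
  | zero =>
    intro lo lmax c h hseed
    rw [Nat.add_zero] at hseed
    rw [List.range'_one]
    simp only [List.reverse_cons, List.reverse_nil, List.nil_append, List.foldl_cons,
      List.foldl_nil, List.map_cons, List.map_nil, List.sum_cons, List.sum_nil]
    simp only [hseed]
    have hin := innerFold arr lo (hi - mid) mid c (by omega)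
    rw [show mid + (hi - mid) = hi by omega] at hin
    rw [hin, show mid - 1 + (hi - mid) = mid - 1 + (hi - mid) from rfl]
    simp
  | succ k ih =>
    intro lo lmax c h hseed
    rw [List.range'_1_concat]
    simp only [List.reverse_append, List.reverse_cons, List.reverse_nil, List.nil_append,
      List.singleton_append, List.foldl_cons, List.map_append, List.map_cons, List.map_nil,
      List.sum_append, List.sum_cons, List.sum_nil]
    simp only [hseed]
    have hin := innerFold arr (lo + (k + 1)) (hi - mid) mid c (by omega)
    rw [show mid + (hi - mid) = hi by omega] at hin
    rw [hin]
    have hseed2 : max (segMax arr (lo + (k + 1)) (mid - 1)) (arr.getD (lo + k) 0)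
        = segMax arr (lo + k) (mid - 1) := by
      have hc := segMax_cons arr (i := lo + k) (j := mid - 1) (by omega)
      rw [show lo + k + 1 = lo + (k + 1) by omega] at hc
      rw [max_comm]
      exact hc.symm
    rw [ih lo _ _ (by omega) hseed2]
    refine Prod.ext rfl ?_
    simp only []
    ring

theorem bCountAux_eq_cnt (arr : List Int) (fuel : Nat) :
    ∀ (lo hi : Nat), hi - lo ≤ fuel → bCountAux fuel arr lo hi = cnt arr lo hi := by
  induction fuel with
  | zero =>
    intro lo hi h
    rw [bCountAux, cnt_small arr (show hi - lo < 2 by omega)]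
  | succ f ih =>
    intro lo hi h
    rw [bCountAux]
    by_cases h2 : hi - lo < 2
    · rw [if_pos h2, cnt_small arr h2]
    · rw [if_neg h2]
      simp only []
      have hlo : lo < (lo + hi) / 2 := by omega
      have hhi : (lo + hi) / 2 < hi := by omega
      rw [ih lo ((lo + hi) / 2) (by omega), ih ((lo + hi) / 2) hi (by omega)]
      rw [cnt_split arr (show lo ≤ (lo + hi) / 2 by omega) (show (lo + hi) / 2 ≤ hi by omega)]
      rw [show (lo + hi) / 2 - lo = ((lo + hi) / 2 - lo - 1) + 1 by omega]
      have hseed : max (arr.getD ((lo + hi) / 2 - 1) 0)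
          (arr.getD (lo + ((lo + hi) / 2 - lo - 1)) 0)
          = segMax arr (lo + ((lo + hi) / 2 - lo - 1)) ((lo + hi) / 2 - 1) := by
        rw [show lo + ((lo + hi) / 2 - lo - 1) = (lo + hi) / 2 - 1 by omega, max_self,
          segMax_self]
      rw [crossFold arr ((lo + hi) / 2) hi (by omega) ((lo + hi) / 2 - lo - 1) lo _ _
        (by omega) hseed]

-- ===== VERDICT (by name: the statement is the Claim_ definition above) =====
theorem solve_spec : Claim_equal_solve := by
  intro arr _ _
  unfold Spec_solve solve_alt
  rw [solve_eq_cnt, bCountAux_eq_cnt arr arr.length 0 arr.length (by omega)]
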